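-- pv_equiv track=rewrite | github.com/leebird/disease-mention-recognition | src/alice.py | get_prev_tokens
-- ===== SOURCE A (Python) =====
-- def get_prev_tokens(text, offset):
--     token = ''
--     tokens = []
--     count = 0
--     for i in range(offset, -1, -1):
--         if count > 9:
--             break
--         if text[i] == ' ':
--             if len(token) == 0:
--                 continue
--             else:
--                 tokens.append(token)
--                 token = ''
--                 count += 1
--         else:
--             token += text[i]
--     if count < 10 and len(token) > 0:
--         tokens.append(token)
--     tokens.reverse()
--     return tokens
-- ===== SOURCE B (Python) =====
-- def get_prev_tokens(text, offset):
--     r = text[:max(offset + 1, 0)][::-1]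
--     frags = [f for f in r.split(' ') if f][:10]
--     frags.reverse()
--     return frags
-- ===== Notes on version B (the rewrite author's own statement) =====
-- stated objective: faster
-- what changed: Replaces the per-character backward loop with explicit token/count state by one whole-prefix slice+reverse and a C-level split on ' ' (filter empties, keep first 10 fragments); Pre_ excludes offset >= len(text), where A raises IndexError.
import Mathlib
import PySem

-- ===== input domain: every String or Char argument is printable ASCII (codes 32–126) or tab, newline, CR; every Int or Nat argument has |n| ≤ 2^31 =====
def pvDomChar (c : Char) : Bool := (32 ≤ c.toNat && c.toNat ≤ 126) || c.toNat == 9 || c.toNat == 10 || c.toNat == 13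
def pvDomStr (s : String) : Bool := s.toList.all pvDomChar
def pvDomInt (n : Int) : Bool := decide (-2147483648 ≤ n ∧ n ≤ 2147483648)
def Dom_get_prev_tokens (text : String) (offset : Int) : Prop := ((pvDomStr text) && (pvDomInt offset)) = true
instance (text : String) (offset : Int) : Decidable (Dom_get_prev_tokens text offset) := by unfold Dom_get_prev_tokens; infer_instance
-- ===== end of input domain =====

-- B replaces A's per-character backward scan by slice-reverse-split-filter-take (C-level string ops; measured faster);
-- equal on Pre_ (offset < len(text)); Pre_ excludes exactly the inputs where A raises IndexError.


-- ===== PORT A =====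
-- tokens/token are kept as List (List Char) / List Char; String.ofList is applied once at the end.
-- the code after the loop ('if count < 10 and len(token) > 0 … ; tokens.reverse()'):
def pvFinishA (token : List Char) (tokens : List (List Char)) (count : Int) : List (List Char) :=
  (if count < 10 ∧ token.length > 0 then tokens ++ [token] else tokens).reverse

-- 'for i in range(offset, -1, -1): …' with break = jumping to pvFinishA; pyGet? = none is Python's
-- IndexError (excluded by Pre_; the value returned there is unclaimed).
def pvLoopA (cs : List Char) : List Int → List Char → List (List Char) → Int → List (List Char)
  | [], token, tokens, count => pvFinishA token tokens count
  | i :: rest, token, tokens, count =>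
    if count > 9 then pvFinishA token tokens count
    else
      match PySem.List.pyGet? cs i with
      | none => pvFinishA token tokens count
      | some c =>
        if c = ' ' then
          if token.length = 0 then pvLoopA cs rest token tokens count
          else pvLoopA cs rest [] (tokens ++ [token]) (count + 1)
        else pvLoopA cs rest (token ++ [c]) tokens count

def get_prev_tokens (text : String) (offset : Int) : List String :=
  (pvLoopA text.toList (PySem.List.pyRange offset (-1) (-1)) [] [] 0).map String.ofList

-- ===== PORT B =====
-- r = text[:max(offset+1,0)][::-1]  ([::-1] is reverse: PySem.List.slice?_none_none_neg_one);
-- frags = [f for f in r.split(' ') if f][:10]; frags.reverse(); return frags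
def get_prev_tokens_alt (text : String) (offset : Int) : List String :=
  let r := (PySem.List.slice text.toList none (some (max (offset + 1) 0))).reverse
  let frags := ((PySem.Chars.splitOn r [' ']).filter (fun f => !f.isEmpty)).take 10
  frags.reverse.map String.ofList

-- ===== PRECONDITION & SPEC =====
-- Pre_ excludes exactly offset ≥ len(text), where A raises IndexError at text[offset].
def Pre_get_prev_tokens (text : String) (offset : Int) : Prop :=
  offset < (text.toList.length : Int)
instance (text : String) (offset : Int) : Decidable (Pre_get_prev_tokens text offset) := by
  unfold Pre_get_prev_tokens; infer_instance
def pvWitness_get_prev_tokens : String × Int := ("a bc d", 4)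

def Spec_get_prev_tokens (text : String) (offset : Int) (out : List String) : Prop := out = get_prev_tokens_alt text offset
instance (text : String) (offset : Int) (out : List String) : Decidable (Spec_get_prev_tokens text offset out) := by unfold Spec_get_prev_tokens; infer_instance

-- ===== CLAIM (what is proved, stated in full; the proofs are below) =====
def Claim_equal_get_prev_tokens : Prop := ∀ (text : String) (offset : Int), Dom_get_prev_tokens text offset → Pre_get_prev_tokens text offset → Spec_get_prev_tokens text offset (get_prev_tokens text offset)
-- ===== LEMMAS AND PROOFS =====

-- A's loop, re-read as a loop over the characters of the reversed prefix (proof-side helper).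
def pvLoopC : List Char → List Char → List (List Char) → Int → List (List Char)
  | [], token, tokens, count => pvFinishA token tokens count
  | c :: rest, token, tokens, count =>
    if count > 9 then pvFinishA token tokens count
    else
      if c = ' ' then
        if token.length = 0 then pvLoopC rest token tokens count
        else pvLoopC rest [] (tokens ++ [token]) (count + 1)
      else pvLoopC rest (token ++ [c]) tokens count

-- split on ' ' with an initial partial fragment (proof-side helper).
def pvSplitH : List Char → List Char → List (List Char)
  | token, [] => [token]
  | token, c :: rest => if c = ' ' then token :: pvSplitH [] rest else pvSplitH (token ++ [c]) rest

lemma pvLoopA_eq_loopC (cs : List Char) : ∀ (n : Nat), n < cs.length →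
    ∀ token tokens count,
    pvLoopA cs (PySem.List.pyRange (n : Int) (-1) (-1)) token tokens count
      = pvLoopC ((cs.take (n + 1)).reverse) token tokens count := by
  intro n
  induction n with
  | zero =>
    intro h token tokens count
    have hrange : PySem.List.pyRange ((0 : Nat) : Int) (-1) (-1) = [(0 : Int)] := by
      rw [PySem.List.pyRange_neg_one_cons (by omega), PySem.List.pyRange_neg_one_eq_nil (by omega)]
      norm_num
    have hget : PySem.List.pyGet? cs (0 : Int) = some cs[0] := by
      rw [show (0 : Int) = ((0 : Nat) : Int) from by norm_num, PySem.List.pyGet?_natCast]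
      exact List.getElem?_eq_getElem h
    have htake : (cs.take 1).reverse = [cs[0]] := by
      rw [List.take_add_one, List.getElem?_eq_getElem h]
      simp
    rw [hrange, htake]
    by_cases c9 : count > 9 <;> by_cases hc : cs[0] = ' ' <;>
      by_cases ht : token.length = 0 <;>
      simp [pvLoopA, pvLoopC, hget, c9, hc, ht]
  | succ m ih =>
    intro h token tokens count
    have hm : m < cs.length := by omega
    have hrange : PySem.List.pyRange ((m + 1 : Nat) : Int) (-1) (-1)
        = ((m + 1 : Nat) : Int) :: PySem.List.pyRange ((m : Nat) : Int) (-1) (-1) := by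
      rw [PySem.List.pyRange_neg_one_cons (by omega)]
      norm_num
    have hget : PySem.List.pyGet? cs ((m : Int) + 1) = some cs[m + 1] := by
      rw [show ((m : Int) + 1) = ((m + 1 : Nat) : Int) from by push_cast; ring,
        PySem.List.pyGet?_natCast]
      exact List.getElem?_eq_getElem h
    have htake : (cs.take (m + 1 + 1)).reverse = cs[m + 1] :: (cs.take (m + 1)).reverse := by
      rw [List.take_add_one, List.getElem?_eq_getElem h]
      simp
    rw [hrange, htake]
    by_cases c9 : count > 9 <;> by_cases hc : cs[m + 1] = ' ' <;>
      by_cases ht : token.length = 0 <;>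
      simp [pvLoopA, pvLoopC, hget, c9, hc, ht, ih hm]

lemma pvLoopC_spec : ∀ (p : List Char) token tokens count, count ≤ 10 →
    pvLoopC p token tokens count
      = (tokens ++ ((pvSplitH token p).filter (fun f => !f.isEmpty)).take (10 - count).toNat).reverse := by
  intro p
  induction p with
  | nil =>
    intro token tokens count h10
    by_cases ht : token = []
    · simp [pvLoopC, pvFinishA, pvSplitH, ht]
    · have hne : token.isEmpty = false := by simpa [List.isEmpty_iff] using ht
      by_cases hlt : count < 10
      · have h1 : 1 ≤ (10 - count).toNat := by omega
        simp [pvLoopC, pvFinishA, pvSplitH, hne,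
          List.length_pos_iff.mpr ht, hlt,
          List.take_of_length_le (show [token].length ≤ (10 - count).toNat by simpa using h1)]
      · have h0 : (10 - count).toNat = 0 := by omega
        simp [pvLoopC, pvFinishA, pvSplitH, hne, hlt, h0]
  | cons c rest ih =>
    intro token tokens count h10
    by_cases c9 : count > 9
    · have h0 : (10 - count).toNat = 0 := by omega
      have hlt : ¬ count < 10 := by omega
      simp [pvLoopC, pvFinishA, c9, h0, hlt]
    · by_cases hc : c = ' '
      · by_cases ht : token.length = 0
        · have ht' : token = [] := List.length_eq_zero_iff.mp ht
          simp [pvLoopC, c9, hc, pvSplitH, ht', ih _ tokens count h10]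
        · have ht2 : token ≠ [] := by intro e; exact ht (by simp [e])
          have hne : token.isEmpty = false := by simpa [List.isEmpty_iff] using ht2
          have hstep : (10 - count).toNat = (10 - (count + 1)).toNat + 1 := by omega
          rw [pvLoopC, if_neg c9, if_pos hc, if_neg ht, ih _ _ (count + 1) (by omega)]
          simp [pvSplitH, hc, hne, hstep, List.take_succ_cons]
      · rw [pvLoopC, if_neg c9, if_neg hc, ih _ tokens count h10]
        simp [pvSplitH, hc]

lemma pvGo_spec : ∀ (l : List Char) (fuel : Nat) (cur : List Char) (acc : List (List Char)),
    l.length < fuel →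
    PySem.Chars.splitOn.go [' '] fuel l cur acc = acc.reverse ++ pvSplitH cur.reverse l := by
  intro l
  induction l with
  | nil =>
    intro fuel cur acc h
    match fuel with
    | f + 1 => simp [PySem.Chars.splitOn.go, pvSplitH]
  | cons c rest ih =>
    intro fuel cur acc h
    match fuel with
    | f + 1 =>
      by_cases hc : c = ' '
      · have hpre : [' '].isPrefixOf (c :: rest) = true := by simp [hc]
        rw [PySem.Chars.splitOn.go]
        simp only [hpre, if_pos]
        rw [show List.drop [' '].length (c :: rest) = rest by simp,
          ih f [] (cur.reverse :: acc) (by simpa using Nat.lt_of_succ_lt_succ h)]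
        simp [pvSplitH, hc]
      · have hpre : [' '].isPrefixOf (c :: rest) = false := by
          simp [List.isPrefixOf]
          intro h'; exact absurd h'.symm hc
        rw [PySem.Chars.splitOn.go]
        simp only [hpre, Bool.false_eq_true, if_false]
        rw [ih f (c :: cur) acc (by simpa using Nat.lt_of_succ_lt_succ h)]
        simp [pvSplitH, hc]

lemma pvSplitOn_eq (p : List Char) : PySem.Chars.splitOn p [' '] = pvSplitH [] p := by
  have := pvGo_spec p (p.length + 1) [] [] (by omega)
  simpa [PySem.Chars.splitOn] using this

-- ===== VERDICT (by name: the statement is the Claim_ definition above) =====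
theorem get_prev_tokens_spec : Claim_equal_get_prev_tokens := by
  intro text offset _hdom hpre
  unfold Spec_get_prev_tokens get_prev_tokens get_prev_tokens_alt
  unfold Pre_get_prev_tokens at hpre
  by_cases hneg : offset < 0
  · have h1 : PySem.List.pyRange offset (-1) (-1) = [] :=
      PySem.List.pyRange_neg_one_eq_nil (by omega)
    have h2 : max (offset + 1) 0 = 0 := by omega
    simp [h1, h2, pvLoopA, pvFinishA, PySem.List.slice_to, pvSplitOn_eq, pvSplitH]
  · replace hneg : 0 ≤ offset := not_lt.mp hneg
    obtain ⟨n, rfl⟩ : ∃ n : Nat, offset = (n : Int) := ⟨offset.toNat, (Int.toNat_of_nonneg hneg).symm⟩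
    have hn : n < text.toList.length := by exact_mod_cast hpre
    have h2 : max ((n : Int) + 1) 0 = ((n + 1 : Nat) : Int) := by omega
    have h3 : PySem.List.slice text.toList none (some ((n + 1 : Nat) : Int))
        = text.toList.take (n + 1) := by
      rw [PySem.List.slice_to]
      · simp
      · exact_mod_cast Nat.zero_le _
    rw [pvLoopA_eq_loopC text.toList n hn, pvLoopC_spec _ _ _ _ (by norm_num)]
    simp only [h2]
    push_cast at h3
    simp [h3, pvSplitOn_eq]
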